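-- pv_equiv track=rewrite | github.com/sepandhaghighi/art | art/art.py | font_size_splitter
-- ===== SOURCE A (Python) =====
-- SMALLTHRESHOLD = 60
--
-- MEDIUMTHRESHOLD = 250
--
-- LARGETHRESHOLD = 500
--
-- def font_size_splitter(font_map):
--     '''
--     This function split fonts to 4 category (small,medium,large,xlarge) by maximum length of letter in each font
--     :param font_map: input fontmap
--     :type font_map : dict
--     :return: splitted fonts as dict
--     '''
--     small_font = []
--     medium_font = []
--     large_font = []
--     xlarge_font = []
--     for font in font_map.keys():
--         length = max(map(len, font_map[font][0].values()))
--         if length <= 80: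
--             small_font.append(font)
--         elif length > SMALLTHRESHOLD and length <= MEDIUMTHRESHOLD:
--             medium_font.append(font)
--         elif length > MEDIUMTHRESHOLD and length <= LARGETHRESHOLD:
--             large_font.append(font)
--         else:
--             xlarge_font.append(font)
--     return {
--         "small_list": small_font,
--         "medium_list": medium_font,
--         "large_list": large_font,
--         "xlarge_list": xlarge_font}
-- ===== SOURCE B (Python) =====
-- def font_size_splitter(font_map):
--     lengths = [(font, max(map(len, font_map[font][0].values()))) for font in font_map]
--     return {
--         "small_list": [f for f, n in lengths if n <= 80],
--         "medium_list": [f for f, n in lengths if 80 < n <= 250],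
--         "large_list": [f for f, n in lengths if 250 < n <= 500],
--         "xlarge_list": [f for f, n in lengths if 500 < n],
--     }
-- ===== Notes on version B (the rewrite author's own statement) =====
-- stated objective: simpler
-- what changed: Replaces the single pass with four mutable accumulator lists and an if/elif threshold cascade by two stages: one pass computing (font, max-length) pairs, then four independent range-filter comprehensions, one per bucket.
import Mathlib
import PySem

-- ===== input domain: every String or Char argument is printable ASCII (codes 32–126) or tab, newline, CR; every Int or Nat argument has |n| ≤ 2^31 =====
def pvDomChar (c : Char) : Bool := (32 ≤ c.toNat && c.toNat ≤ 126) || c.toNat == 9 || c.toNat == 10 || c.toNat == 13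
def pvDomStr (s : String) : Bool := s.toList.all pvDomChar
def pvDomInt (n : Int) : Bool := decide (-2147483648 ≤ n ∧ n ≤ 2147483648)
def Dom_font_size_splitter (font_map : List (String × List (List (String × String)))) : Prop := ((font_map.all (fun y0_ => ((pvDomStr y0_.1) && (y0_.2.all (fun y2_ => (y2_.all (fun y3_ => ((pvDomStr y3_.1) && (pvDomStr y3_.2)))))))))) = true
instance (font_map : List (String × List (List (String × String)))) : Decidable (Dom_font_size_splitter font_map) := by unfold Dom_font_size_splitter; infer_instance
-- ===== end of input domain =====

-- B replaces A's one-pass if/elif cascade over four accumulator lists by two stages: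
-- a length-computation pass, then four independent range filters; objective: simpler.

-- shared by both Pythons: length = max(map(len, font_map[font][0].values()))
-- (pyGet? 0 is none on an empty list and max? is none on an empty values list:
--  exactly where Python raises; the getD defaults are unreachable inside Pre_)
def maxLetterLen (data : List (List (String × String))) : Int :=
  (PySem.List.max? (((PySem.List.pyGet? data 0).getD []).map (fun kv => PySem.Str.len kv.2)) (fun v => v)).getD 0

-- ===== PORT A =====
def SMALLTHRESHOLD : Int := 60
def MEDIUMTHRESHOLD : Int := 250
def LARGETHRESHOLD : Int := 500

def font_size_splitter (font_map : List (String × List (List (String × String)))) : List (String × List String) :=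
  let r := font_map.foldl
    (fun (st : List String × List String × List String × List String) p =>
      let length := maxLetterLen p.2
      if length ≤ 80 then (st.1 ++ [p.1], st.2.1, st.2.2.1, st.2.2.2)
      else if SMALLTHRESHOLD < length ∧ length ≤ MEDIUMTHRESHOLD then
        (st.1, st.2.1 ++ [p.1], st.2.2.1, st.2.2.2)
      else if MEDIUMTHRESHOLD < length ∧ length ≤ LARGETHRESHOLD then
        (st.1, st.2.1, st.2.2.1 ++ [p.1], st.2.2.2)
      else (st.1, st.2.1, st.2.2.1, st.2.2.2 ++ [p.1]))
    ([], [], [], [])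
  [("small_list", r.1), ("medium_list", r.2.1), ("large_list", r.2.2.1), ("xlarge_list", r.2.2.2)]

-- ===== PORT B =====
def font_size_splitter_alt (font_map : List (String × List (List (String × String)))) : List (String × List String) :=
  let lengths : List (String × Int) := font_map.map (fun p => (p.1, maxLetterLen p.2))
  [("small_list", (lengths.filter (fun q => q.2 ≤ 80)).map (fun q => q.1)),
   ("medium_list", (lengths.filter (fun q => 80 < q.2 ∧ q.2 ≤ 250)).map (fun q => q.1)),
   ("large_list", (lengths.filter (fun q => 250 < q.2 ∧ q.2 ≤ 500)).map (fun q => q.1)),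
   ("xlarge_list", (lengths.filter (fun q => 500 < q.2)).map (fun q => q.1))]

-- ===== PRECONDITION & SPEC =====
-- Pre_ excludes exactly the inputs on which Python A raises: a font whose entry list is
-- empty (IndexError on [0]) or whose first letter dict is empty (ValueError from max()).
def Pre_font_size_splitter (font_map : List (String × List (List (String × String)))) : Prop :=
  ∀ p ∈ font_map, p.2 ≠ [] ∧ p.2.headD [] ≠ []
instance (font_map : List (String × List (List (String × String)))) : Decidable (Pre_font_size_splitter font_map) := by unfold Pre_font_size_splitter; infer_instance

def pvWitness_font_size_splitter : (List (String × List (List (String × String)))) :=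
  [("font1", [[("a", "hello")]])]

def Spec_font_size_splitter (font_map : List (String × List (List (String × String)))) (out : List (String × List String)) : Prop := out = font_size_splitter_alt font_map
instance (font_map : List (String × List (List (String × String)))) (out : List (String × List String)) : Decidable (Spec_font_size_splitter font_map out) := by unfold Spec_font_size_splitter; infer_instance

-- ===== CLAIM (what is proved, stated in full; the proofs are below) =====
def Claim_equal_font_size_splitter : Prop := ∀ (font_map : List (String × List (List (String × String)))), Dom_font_size_splitter font_map → Pre_font_size_splitter font_map → Spec_font_size_splitter font_map (font_size_splitter font_map)

-- ===== LEMMAS AND PROOFS =====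

-- A's fold from an arbitrary start extends each bucket by the corresponding filter of the tail
theorem fs_fold (fm : List (String × List (List (String × String)))) :
    ∀ (s m l x : List String),
      fm.foldl
        (fun (st : List String × List String × List String × List String) p =>
          let length := maxLetterLen p.2
          if length ≤ 80 then (st.1 ++ [p.1], st.2.1, st.2.2.1, st.2.2.2)
          else if SMALLTHRESHOLD < length ∧ length ≤ MEDIUMTHRESHOLD then
            (st.1, st.2.1 ++ [p.1], st.2.2.1, st.2.2.2)
          else if MEDIUMTHRESHOLD < length ∧ length ≤ LARGETHRESHOLD then
            (st.1, st.2.1, st.2.2.1 ++ [p.1], st.2.2.2)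
          else (st.1, st.2.1, st.2.2.1, st.2.2.2 ++ [p.1]))
        (s, m, l, x)
      = (s ++ ((fm.map (fun p => (p.1, maxLetterLen p.2))).filter (fun q => q.2 ≤ 80)).map (fun q => q.1),
         m ++ ((fm.map (fun p => (p.1, maxLetterLen p.2))).filter (fun q => 80 < q.2 ∧ q.2 ≤ 250)).map (fun q => q.1),
         l ++ ((fm.map (fun p => (p.1, maxLetterLen p.2))).filter (fun q => 250 < q.2 ∧ q.2 ≤ 500)).map (fun q => q.1),
         x ++ ((fm.map (fun p => (p.1, maxLetterLen p.2))).filter (fun q => 500 < q.2)).map (fun q => q.1)) := by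
  induction fm with
  | nil => intro s m l x; simp
  | cons p t ih =>
    intro s m l x
    rw [List.foldl_cons]
    set n := maxLetterLen p.2 with hn
    by_cases h1 : n ≤ 80
    · have hF80 : ¬ (80 < n) := by omega
      have hF250 : ¬ (250 < n) := by omega
      have hF500 : ¬ (500 < n) := by omega
      simp only [if_pos h1]
      rw [ih]
      simp [← hn, h1, hF80, hF250, hF500]
    · by_cases h2 : n ≤ 250
      · have hT80 : 80 < n := by omega
        have hSm : SMALLTHRESHOLD < n ∧ n ≤ MEDIUMTHRESHOLD := by
          simp only [SMALLTHRESHOLD, MEDIUMTHRESHOLD]; omega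
        have hF250 : ¬ (250 < n) := by omega
        have hF500 : ¬ (500 < n) := by omega
        simp only [if_neg h1, if_pos hSm]
        rw [ih]
        simp [← hn, h1, h2, hT80, hF250, hF500]
      · by_cases h3 : n ≤ 500
        · have hT80 : 80 < n := by omega
          have hT250 : 250 < n := by omega
          have hSm : ¬ (SMALLTHRESHOLD < n ∧ n ≤ MEDIUMTHRESHOLD) := by
            simp only [SMALLTHRESHOLD, MEDIUMTHRESHOLD]; omega
          have hMd : MEDIUMTHRESHOLD < n ∧ n ≤ LARGETHRESHOLD := by
            simp only [MEDIUMTHRESHOLD, LARGETHRESHOLD]; omega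
          have hF500 : ¬ (500 < n) := by omega
          simp only [if_neg h1, if_neg hSm, if_pos hMd]
          rw [ih]
          simp [← hn, h1, h2, h3, hT80, hT250, hF500]
        · have hT80 : 80 < n := by omega
          have hT250 : 250 < n := by omega
          have hT500 : 500 < n := by omega
          have hSm : ¬ (SMALLTHRESHOLD < n ∧ n ≤ MEDIUMTHRESHOLD) := by
            simp only [SMALLTHRESHOLD, MEDIUMTHRESHOLD]; omega
          have hMd : ¬ (MEDIUMTHRESHOLD < n ∧ n ≤ LARGETHRESHOLD) := by
            simp only [MEDIUMTHRESHOLD, LARGETHRESHOLD]; omega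
          simp only [if_neg h1, if_neg hSm, if_neg hMd]
          rw [ih]
          simp [← hn, h1, h2, h3, hT80, hT250, hT500]

-- ===== VERDICT (by name: the statement is the Claim_ definition above) =====
theorem font_size_splitter_spec : Claim_equal_font_size_splitter := by
  intro fm _ _
  unfold Spec_font_size_splitter font_size_splitter font_size_splitter_alt
  rw [fs_fold fm [] [] [] []]
  simp
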